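-- pv_equiv track=rewrite | github.com/tatachi1/MoFox-Core | scripts/convert_sqlalchemy_models.py | detect_column_block
-- ===== SOURCE A (Python) =====
-- def detect_column_block(lines: list[str], start_index: int) -> tuple[int, int] | None:
--     """检测从 start_index 开始的 Column(...) 语句跨越的行范围 (包含结束行)。
--
--     使用括号计数法处理多行。
--     返回 (start, end) 行号 (包含 end)。"""
--     line = lines[start_index]
--     if "Column(" not in line:
--         return None
--     open_parens = line.count("(") - line.count(")")
--     i = start_index
--     while open_parens > 0 and i + 1 < len(lines):
--         i += 1
--         l2 = lines[i]
--         open_parens += l2.count("(") - l2.count(")")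
--     return (start_index, i)
-- ===== SOURCE B (Python) =====
-- def detect_column_block(lines: list[str], start_index: int) -> tuple[int, int] | None:
--     """Table-based re-implementation: build per-line paren deltas and their
--     running balances, then search for the first offset whose balance is <= 0."""
--     if "Column(" not in lines[start_index]:
--         return None
--     deltas = [lines[i].count("(") - lines[i].count(")")
--               for i in range(start_index, len(lines))]
--     balances = []
--     total = 0
--     for d in deltas:
--         total += d
--         balances.append(total)
--     for off, bal in enumerate(balances):
--         if bal <= 0:
--             return (start_index, start_index + off)
--     return (start_index, len(lines) - 1)
-- ===== Notes on version B (the rewrite author's own statement) =====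
-- stated objective: alternative
-- what changed: A's single fused while-loop that threads a paren balance while advancing the line index is replaced by a build-table decomposition: a list of per-line paren deltas over lines[start_index:], a running-balance prefix-sum table, and a separate search for the first offset whose balance is <= 0.
import Mathlib
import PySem

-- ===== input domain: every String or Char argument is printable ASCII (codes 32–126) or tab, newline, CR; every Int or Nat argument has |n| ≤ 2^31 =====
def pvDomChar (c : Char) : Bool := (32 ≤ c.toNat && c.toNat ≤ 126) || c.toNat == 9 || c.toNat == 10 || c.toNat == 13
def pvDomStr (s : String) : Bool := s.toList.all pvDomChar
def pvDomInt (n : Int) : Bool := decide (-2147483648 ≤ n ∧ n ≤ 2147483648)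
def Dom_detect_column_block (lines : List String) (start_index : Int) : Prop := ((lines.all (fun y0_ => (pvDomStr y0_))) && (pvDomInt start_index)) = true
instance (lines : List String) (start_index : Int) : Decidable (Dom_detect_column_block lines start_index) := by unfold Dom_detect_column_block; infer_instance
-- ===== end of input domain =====

-- B replaces A's fused while-loop paren scan by a build-table (per-line deltas, running balances)
-- then search phase (first offset with balance ≤ 0); objective: alternative decomposition, same cost.


-- ===== PORT A =====
-- A's while loop: advance i while open_parens > 0 and i+1 < len(lines), adding each line's paren delta.
def pvLoopA (lines : List String) (open_parens : Int) (i : Int) : Int :=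
  if _h : open_parens > 0 ∧ i + 1 < (lines.length : Int) then
    let l2 := PySem.List.pyGetD lines (i + 1) ""
    pvLoopA lines (open_parens + ((PySem.Str.count l2 "(" : Int) - (PySem.Str.count l2 ")" : Int))) (i + 1)
  else i
termination_by ((lines.length : Int) - i).toNat
decreasing_by omega

def detect_column_block (lines : List String) (start_index : Int) : Option (Int × Int) :=
  match PySem.List.pyGet? lines start_index with
  | none => none  -- IndexError; excluded by Pre_
  | some line =>
    if PySem.Str.isIn "Column(" line then
      let open_parens : Int := (PySem.Str.count line "(" : Int) - (PySem.Str.count line ")" : Int)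
      some (start_index, pvLoopA lines open_parens start_index)
    else none

-- ===== PORT B =====
-- running balances of the delta table (the 'total' loop in Source B)
def pvBalances (acc : List Int) (total : Int) (ds : List Int) : List Int × Int :=
  ds.foldl (fun (p : List Int × Int) d => (p.1 ++ [p.2 + d], p.2 + d)) (acc, total)

def detect_column_block_alt (lines : List String) (start_index : Int) : Option (Int × Int) :=
  match PySem.List.pyGet? lines start_index with
  | none => none  -- IndexError; excluded by Pre_
  | some line =>
    if PySem.Str.isIn "Column(" line then
      let deltas := (PySem.List.pyRange start_index (lines.length : Int) 1).map
        (fun i => (PySem.Str.count (PySem.List.pyGetD lines i "") "(" : Int)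
                  - (PySem.Str.count (PySem.List.pyGetD lines i "") ")" : Int))
      let balances := (pvBalances [] 0 deltas).1
      match balances.findIdx? (fun b => decide (b ≤ 0)) with
      | some off => some (start_index, start_index + (off : Int))
      | none => some (start_index, (lines.length : Int) - 1)
    else none

-- ===== PRECONDITION & SPEC =====
-- Pre_ excludes exactly the out-of-range indices, on which A raises IndexError.
def Pre_detect_column_block (lines : List String) (start_index : Int) : Prop :=
  PySem.Raise.InRange lines.length start_index
instance (lines : List String) (start_index : Int) : Decidable (Pre_detect_column_block lines start_index) := by unfold Pre_detect_column_block; infer_instance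

def pvWitness_detect_column_block : List String × Int := (["x = Column(", ")"], 0)

def Spec_detect_column_block (lines : List String) (start_index : Int) (out : Option (Int × Int)) : Prop := out = detect_column_block_alt lines start_index
instance (lines : List String) (start_index : Int) (out : Option (Int × Int)) : Decidable (Spec_detect_column_block lines start_index out) := by unfold Spec_detect_column_block; infer_instance

-- ===== CLAIM (what is proved, stated in full; the proofs are below) =====
def Claim_equal_detect_column_block : Prop := ∀ (lines : List String) (start_index : Int), Dom_detect_column_block lines start_index → Pre_detect_column_block lines start_index → Spec_detect_column_block lines start_index (detect_column_block lines start_index)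

-- ===== LEMMAS AND PROOFS =====

-- per-line paren delta
def pvDelta (lines : List String) (i : Int) : Int :=
  (PySem.Str.count (PySem.List.pyGetD lines i "") "(" : Int)
  - (PySem.Str.count (PySem.List.pyGetD lines i "") ")" : Int)

-- prefix sums starting from a running total
def pvPsum (t : Int) : List Int → List Int
  | [] => []
  | d :: ds => (t + d) :: pvPsum (t + d) ds

theorem pvBalances_eq (ds : List Int) : ∀ (acc : List Int) (t : Int),
    pvBalances acc t ds = (acc ++ pvPsum t ds, t + ds.sum) := by
  induction ds with
  | nil => intro acc t; simp [pvBalances, pvPsum]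
  | cons d ds ih =>
      intro acc t
      simp only [pvBalances, List.foldl_cons] at ih ⊢
      rw [ih]
      simp [pvPsum, List.append_assoc]
      ring

theorem pvLoopA_eq (lines : List String) : ∀ (fuel : Nat) (i b : Int),
    (lines.length : Int) - 1 - i ≤ (fuel : Int) → i < (lines.length : Int) →
    pvLoopA lines b i =
      if b ≤ 0 then i
      else match ((PySem.List.pyRange (i + 1) (lines.length : Int) 1).map
              (pvDelta lines) |> pvPsum b).findIdx? (fun x => decide (x ≤ 0)) with
        | some j => i + 1 + (j : Int)
        | none => (lines.length : Int) - 1 := by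
  intro fuel
  induction fuel with
  | zero =>
      intro i b hfuel hi
      have hieq : i = (lines.length : Int) - 1 := by omega
      rw [pvLoopA]
      have : ¬ (b > 0 ∧ i + 1 < (lines.length : Int)) := by omega
      rw [dif_neg this]
      by_cases hb : b ≤ 0
      · simp [hb]
      · simp only [if_neg hb]
        rw [PySem.List.pyRange_one_eq_nil (by omega)]
        simp [pvPsum]
        omega
  | succ n ih =>
      intro i b hfuel hi
      rw [pvLoopA]
      by_cases hb : b ≤ 0
      · have : ¬ (b > 0 ∧ i + 1 < (lines.length : Int)) := by omega
        rw [dif_neg this]; simp [hb]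
      · simp only [if_neg hb]
        by_cases hnext : i + 1 < (lines.length : Int)
        · rw [dif_pos ⟨by omega, hnext⟩]
          have hrec := ih (i + 1) (b + pvDelta lines (i + 1)) (by omega) (by omega)
          rw [show (b + ((PySem.Str.count (PySem.List.pyGetD lines (i+1) "") "(" : Int)
                - (PySem.Str.count (PySem.List.pyGetD lines (i+1) "") ")" : Int)))
              = b + pvDelta lines (i + 1) from rfl, hrec]
          rw [PySem.List.pyRange_one_cons hnext]
          simp only [List.map_cons, pvPsum]
          by_cases hb2 : b + pvDelta lines (i + 1) ≤ 0
          · rw [if_pos hb2]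
            rw [List.findIdx?_cons]
            simp [hb2]
          · rw [if_neg hb2]
            rw [List.findIdx?_cons]
            simp only [decide_eq_true_eq, hb2, if_false]
            cases hfi : (((PySem.List.pyRange (i + 1 + 1) (lines.length : Int) 1).map
                (pvDelta lines) |> pvPsum (b + pvDelta lines (i + 1)))).findIdx?
                (fun x => decide (x ≤ 0)) with
            | none => simp
            | some j => simp; omega
        · rw [dif_neg (by omega)]
          rw [PySem.List.pyRange_one_eq_nil (by omega)]
          simp [pvPsum]
          omega

-- ===== VERDICT (by name: the statement is the Claim_ definition above) =====
theorem detect_column_block_spec : Claim_equal_detect_column_block := by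
  intro lines s _hdom hpre
  unfold Pre_detect_column_block PySem.Raise.InRange at hpre
  unfold Spec_detect_column_block detect_column_block detect_column_block_alt
  have hsome : ∃ line, PySem.List.pyGet? lines s = some line := by
    cases h : PySem.List.pyGet? lines s with
    | none =>
        exact absurd ((PySem.List.pyGet?_eq_none_iff lines s).mp h)
          (by unfold PySem.Raise.InRange; omega)
    | some l => exact ⟨l, rfl⟩
  obtain ⟨line, hline⟩ := hsome
  rw [hline]
  dsimp only
  by_cases hcol : PySem.Str.isIn "Column(" line = true
  · rw [if_pos hcol, if_pos hcol]
    have hgd : PySem.List.pyGetD lines s "" = line := by simp [PySem.List.pyGetD, hline]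
    have hδ : pvDelta lines s
        = (PySem.Str.count line "(" : Int) - (PySem.Str.count line ")" : Int) := by
      rw [pvDelta, hgd]
    have hrange : PySem.List.pyRange s (lines.length : Int) 1
        = s :: PySem.List.pyRange (s + 1) (lines.length : Int) 1 :=
      PySem.List.pyRange_one_cons (by omega)
    rw [show ((PySem.List.pyRange s (lines.length : Int) 1).map
          (fun i => (PySem.Str.count (PySem.List.pyGetD lines i "") "(" : Int)
            - (PySem.Str.count (PySem.List.pyGetD lines i "") ")" : Int)))
        = (PySem.List.pyRange s (lines.length : Int) 1).map (pvDelta lines) from rfl]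
    rw [hrange, List.map_cons, pvBalances_eq, List.nil_append, pvPsum, zero_add, hδ,
        List.findIdx?_cons]
    have hloop := pvLoopA_eq lines ((lines.length : Int) - 1 - s).toNat s
      ((PySem.Str.count line "(" : Int) - (PySem.Str.count line ")" : Int))
      (by omega) (by omega)
    by_cases hb : (PySem.Str.count line "(" : Int) - (PySem.Str.count line ")" : Int) ≤ 0
    · rw [hloop, if_pos hb, if_pos (by simp at hb ⊢; omega)]
      simp
    · rw [hloop, if_neg hb, if_neg (by simp at hb ⊢; omega)]
      cases hfi : ((PySem.List.pyRange (s + 1) (lines.length : Int) 1).map (pvDelta lines)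
          |> pvPsum ((PySem.Str.count line "(" : Int) - (PySem.Str.count line ")" : Int))).findIdx?
          (fun x => decide (x ≤ 0)) with
      | none => simp
      | some j =>
          simp only [Option.map_some]
          push_cast
          ring_nf
  · rw [if_neg hcol, if_neg hcol]
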